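-- pv_equiv track=rewrite | github.com/jeonjeon/leetcode | 2337-move-pieces-to-obtain-a-string/2337-move-pieces-to-obtain-a-string.py | canChange
-- ===== SOURCE A (Python) =====
-- def canChange(start: str, target: str) -> bool:
--     l = len(start)
--     si, ti = 0, 0
--     while ti < l or si < l:
--         while si < l and start[si] == '_':
--             si += 1
--         while ti < l and target[ti] == '_':
--             ti += 1
--         if si >= l and ti >= l:
--             return True
--         if si >= l or ti >= l:
--             return False
--         if target[ti] != start[si]:
--             return False
--         if start[si] == 'R' and ti < si:
--             return False
--         if start[si] == 'L' and ti > si: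
--             return False
--         si += 1
--         ti += 1
--     return True
-- ===== SOURCE B (Python) =====
-- def canChange(start: str, target: str) -> bool:
--     # Counting algorithm: the non-underscore pieces must be identical as sequences,
--     # and in every prefix target must have at least as many 'L's and at most as many
--     # 'R's as start (L pieces only move left, R pieces only move right).
--     # A reads only the first len(start) characters of target; the slice makes that explicit.
--     t = target[:len(start)]
--     if [c for c in start if c != '_'] != [c for c in t if c != '_']:
--         return False
--     sl = sr = tl = tr = 0
--     for sc, tc in zip(start, t):
--         if sc == 'L':
--             sl += 1
--         elif sc == 'R':
--             sr += 1
--         if tc == 'L':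
--             tl += 1
--         elif tc == 'R':
--             tr += 1
--         if tl < sl or sr < tr:
--             return False
--     return True
-- ===== Notes on version B (the rewrite author's own statement) =====
-- stated objective: alternative
-- what changed: Replaces A's two-pointer index-matching scan with a counting algorithm: compare the underscore-free character sequences for equality, then a single counter pass checking that no prefix of target has fewer 'L's or more 'R's than the same prefix of start; no piece positions are ever paired.
-- outside the precondition, e.g. on canChange('LR', 'R'): A returns False, B returns False; on canChange('_', ''): A raises IndexError, B returns True
import Mathlib
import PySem

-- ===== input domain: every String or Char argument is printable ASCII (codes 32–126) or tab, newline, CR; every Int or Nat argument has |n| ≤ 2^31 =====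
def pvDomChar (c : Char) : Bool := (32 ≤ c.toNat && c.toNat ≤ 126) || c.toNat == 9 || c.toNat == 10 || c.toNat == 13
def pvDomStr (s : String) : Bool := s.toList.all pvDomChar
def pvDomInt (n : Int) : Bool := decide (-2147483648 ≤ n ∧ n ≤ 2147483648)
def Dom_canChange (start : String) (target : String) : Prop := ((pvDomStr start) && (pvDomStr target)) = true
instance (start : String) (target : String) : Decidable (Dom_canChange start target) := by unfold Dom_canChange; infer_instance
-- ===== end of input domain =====

-- B replaces A's two-pointer index-matching scan by a counting algorithm (equal
-- underscore-free sequences + prefix L/R counts): alternative algorithm, same O(n) cost.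


-- ===== PORT A =====
-- inner 'while i < l and cs[i] == '_': i += 1' (getD ' ' is only read with i in range on inputs inside Pre_)
def pvSkip (cs : List Char) (l i : Nat) : Nat :=
  if i < l ∧ cs.getD i ' ' = '_' then pvSkip cs l (i+1) else i
termination_by l - i
decreasing_by omega

theorem pvSkip_ge (cs : List Char) (l i : Nat) : i ≤ pvSkip cs l i := by
  fun_induction pvSkip cs l i with
  | case1 _ _ ih => omega
  | case2 => omega

-- the outer 'while ti < l or si < l' loop of A; the Python reassignments
-- 'si = <skipped si>' / 'ti = <skipped ti>' appear as the inlined pvSkip calls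
def pvLoop (ss ts : List Char) (l si ti : Nat) : Bool :=
  if ti < l ∨ si < l then
    if l ≤ pvSkip ss l si ∧ l ≤ pvSkip ts l ti then true
    else if l ≤ pvSkip ss l si ∨ l ≤ pvSkip ts l ti then false
    else if ts.getD (pvSkip ts l ti) ' ' ≠ ss.getD (pvSkip ss l si) ' ' then false
    else if ss.getD (pvSkip ss l si) ' ' = 'R' ∧ pvSkip ts l ti < pvSkip ss l si then false
    else if ss.getD (pvSkip ss l si) ' ' = 'L' ∧ pvSkip ss l si < pvSkip ts l ti then false
    else pvLoop ss ts l (pvSkip ss l si + 1) (pvSkip ts l ti + 1)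
  else true
termination_by (l - si) + (l - ti)
decreasing_by
  have h1 := pvSkip_ge ss l si
  have h2 := pvSkip_ge ts l ti
  omega

def canChange (start : String) (target : String) : Bool :=
  pvLoop start.toList target.toList start.toList.length 0 0

-- ===== PORT B =====
-- the 'for sc, tc in zip(start, t):' loop with counters sl, sr, tl, tr and early return
def pvCntLoop : List (Char × Char) → Nat → Nat → Nat → Nat → Bool
  | [], _, _, _, _ => true
  | (sc, tc) :: rest, sl, sr, tl, tr =>
    let p := if sc = 'L' then (sl + 1, sr) else if sc = 'R' then (sl, sr + 1) else (sl, sr)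
    let q := if tc = 'L' then (tl + 1, tr) else if tc = 'R' then (tl, tr + 1) else (tl, tr)
    if q.1 < p.1 ∨ p.2 < q.2 then false else pvCntLoop rest p.1 p.2 q.1 q.2

def canChange_alt (start : String) (target : String) : Bool :=
  let s := start.toList
  -- t = target[:len(start)]
  let t := PySem.List.slice target.toList none (some (s.length : Int))
  -- [c for c in start if c != '_'] != [c for c in t if c != '_']
  if s.filter (fun c => c != '_') ≠ t.filter (fun c => c != '_') then false
  else pvCntLoop (s.zip t) 0 0 0 0

-- ===== PRECONDITION & SPEC =====
-- Pre_ excludes inputs with target shorter than start, on which A's scan can run past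
-- target's end and raise IndexError; where A does return there it has already found a
-- mismatch and returns False, as B does.
def Pre_canChange (start : String) (target : String) : Prop :=
  start.toList.length ≤ target.toList.length
instance (start : String) (target : String) : Decidable (Pre_canChange start target) := by
  unfold Pre_canChange; infer_instance

def pvWitness_canChange : String × String := ("_L__R__R_", "L______RR")

def Spec_canChange (start : String) (target : String) (out : Bool) : Prop := out = canChange_alt start target
instance (start : String) (target : String) (out : Bool) : Decidable (Spec_canChange start target out) := by unfold Spec_canChange; infer_instance

-- ===== CLAIM (what is proved, stated in full; the proofs are below) =====
def Claim_equal_canChange : Prop := ∀ (start : String) (target : String), Dom_canChange start target → Pre_canChange start target → Spec_canChange start target (canChange start target)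

-- ===== LEMMAS AND PROOFS =====

-- piece list of a suffix, structurally (index offset carried along)
def pfL : List Char → Nat → List (Char × Nat)
  | [], _ => []
  | c :: r, i => if c = '_' then pfL r (i+1) else (c, i) :: pfL r (i+1)

def pf (cs : List Char) (i : Nat) : List (Char × Nat) := pfL (cs.drop i) i

-- A's loop as a comparison of the two piece lists
def chk (xs ys : List (Char × Nat)) : Bool :=
  if xs.length ≠ ys.length then false
  else (xs.zip ys).all (fun q =>
    q.1.1 == q.2.1 && !(q.1.1 == 'R' && decide (q.2.2 < q.1.2))
                   && !(q.1.1 == 'L' && decide (q.1.2 < q.2.2)))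

theorem pf_stop (cs : List Char) (i : Nat) (h : cs.length ≤ i) : pf cs i = [] := by
  simp [pf, List.drop_eq_nil_of_le h, pfL]

theorem pf_step (cs : List Char) (i : Nat) (h : i < cs.length) :
    pf cs i = if cs.getD i ' ' = '_' then pf cs (i+1)
              else (cs.getD i ' ', i) :: pf cs (i+1) := by
  have hg : cs.getD i ' ' = cs[i] := List.getD_eq_getElem cs ' ' h
  unfold pf
  rw [List.drop_eq_getElem_cons h, hg]
  rfl

theorem pf_skip (cs : List Char) (l : Nat) (hl : l = cs.length) (i : Nat) :
    pf cs (pvSkip cs l i) = pf cs i := by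
  fun_induction pvSkip cs l i with
  | case1 i h ih =>
    rw [ih, pf_step cs i (by omega), if_pos h.2]
  | case2 => rfl

theorem pvSkip_stop (cs : List Char) (l i : Nat) :
    pvSkip cs l i < l → cs.getD (pvSkip cs l i) ' ' ≠ '_' := by
  fun_induction pvSkip cs l i with
  | case1 _ _ ih => exact ih
  | case2 i h => intro hi hc; exact h ⟨hi, hc⟩

theorem chk_cons (x y : Char × Nat) (xs ys : List (Char × Nat)) :
    chk (x :: xs) (y :: ys) =
      ((x.1 == y.1 && !(x.1 == 'R' && decide (y.2 < x.2))
                   && !(x.1 == 'L' && decide (x.2 < y.2))) && chk xs ys) := by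
  by_cases hl : xs.length = ys.length
  · simp [chk, hl]
  · simp [chk, hl, Bool.and_comm]

theorem getD_take_lt (cs : List Char) (l i : Nat) (h : i < l) :
    (cs.take l).getD i ' ' = cs.getD i ' ' := by
  simp [List.getD_eq_getElem?_getD, h]

theorem pvSkip_take (cs : List Char) (l i : Nat) :
    pvSkip (cs.take l) l i = pvSkip cs l i := by
  fun_induction pvSkip cs l i with
  | case1 i h ih =>
    rw [pvSkip, if_pos ⟨h.1, by rw [getD_take_lt cs l i h.1]; exact h.2⟩, ih]
  | case2 i h =>
    rw [pvSkip, if_neg]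
    intro hc
    exact h ⟨hc.1, by rw [← getD_take_lt cs l i hc.1]; exact hc.2⟩

theorem loop_eq_chk (ss ts : List Char) (l : Nat)
    (hs : l = ss.length) (ht : l ≤ ts.length) (si ti : Nat) :
    pvLoop ss ts l si ti = chk (pf ss si) (pf (ts.take l) ti) := by
  have htl : (ts.take l).length = l := by
    rw [List.length_take]; omega
  fun_induction pvLoop ss ts l si ti with
  | case1 si ti hcond h1 =>
    rw [← pf_skip ss l hs si, ← pf_skip (ts.take l) l htl.symm ti, pvSkip_take ts l ti,
        pf_stop ss _ (by omega), pf_stop (ts.take l) _ (by omega)]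
    simp [chk]
  | case2 si ti hcond h1 h2 =>
    rw [← pf_skip ss l hs si, ← pf_skip (ts.take l) l htl.symm ti, pvSkip_take ts l ti]
    rcases h2 with h2 | h2
    · have hti : pvSkip ts l ti < l := by omega
      have hstop : (ts.take l).getD (pvSkip ts l ti) ' ' ≠ '_' := by
        rw [← pvSkip_take ts l ti]
        exact pvSkip_stop (ts.take l) l ti (by rw [pvSkip_take ts l ti]; omega)
      rw [pf_stop ss _ (by omega), pf_step (ts.take l) _ (by omega), if_neg hstop]
      simp [chk]
    · have hsi : pvSkip ss l si < l := by omega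
      rw [pf_stop (ts.take l) _ (by omega), pf_step ss _ (by omega),
          if_neg (pvSkip_stop ss l si hsi)]
      simp [chk]
  | case3 si ti hcond h1 h2 h3 =>
    have hsi : pvSkip ss l si < l := by omega
    have hti : pvSkip ts l ti < l := by omega
    have hstop : (ts.take l).getD (pvSkip ts l ti) ' ' ≠ '_' := by
      rw [← pvSkip_take ts l ti]
      exact pvSkip_stop (ts.take l) l ti (by rw [pvSkip_take ts l ti]; omega)
    rw [← pf_skip ss l hs si, ← pf_skip (ts.take l) l htl.symm ti, pvSkip_take ts l ti,
        pf_step ss _ (by omega), pf_step (ts.take l) _ (by omega),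
        if_neg (pvSkip_stop ss l si hsi), if_neg hstop,
        getD_take_lt ts l _ hti, chk_cons]
    have hne : (ss.getD (pvSkip ss l si) ' ' == ts.getD (pvSkip ts l ti) ' ') = false := by
      simp only [beq_eq_false_iff_ne, ne_eq]
      exact fun h => h3 h.symm
    simp only [List.getD_eq_getElem?_getD] at hne
    simp [hne]
  | case4 si ti hcond h1 h2 h3 h4 =>
    have hsi : pvSkip ss l si < l := by omega
    have hti : pvSkip ts l ti < l := by omega
    have hstop : (ts.take l).getD (pvSkip ts l ti) ' ' ≠ '_' := by
      rw [← pvSkip_take ts l ti]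
      exact pvSkip_stop (ts.take l) l ti (by rw [pvSkip_take ts l ti]; omega)
    rw [← pf_skip ss l hs si, ← pf_skip (ts.take l) l htl.symm ti, pvSkip_take ts l ti,
        pf_step ss _ (by omega), pf_step (ts.take l) _ (by omega),
        if_neg (pvSkip_stop ss l si hsi), if_neg hstop,
        getD_take_lt ts l _ hti, chk_cons]
    have hc := h4.1
    have hlt := h4.2
    simp only [List.getD_eq_getElem?_getD] at hc
    simp [hc, hlt]
  | case5 si ti hcond h1 h2 h3 h4 h5 =>
    have hsi : pvSkip ss l si < l := by omega
    have hti : pvSkip ts l ti < l := by omega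
    have hstop : (ts.take l).getD (pvSkip ts l ti) ' ' ≠ '_' := by
      rw [← pvSkip_take ts l ti]
      exact pvSkip_stop (ts.take l) l ti (by rw [pvSkip_take ts l ti]; omega)
    rw [← pf_skip ss l hs si, ← pf_skip (ts.take l) l htl.symm ti, pvSkip_take ts l ti,
        pf_step ss _ (by omega), pf_step (ts.take l) _ (by omega),
        if_neg (pvSkip_stop ss l si hsi), if_neg hstop,
        getD_take_lt ts l _ hti, chk_cons]
    have heq : ts.getD (pvSkip ts l ti) ' ' = ss.getD (pvSkip ss l si) ' ' := by
      by_contra hne; exact h3 hne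
    have hc := h5.1
    have hlt := h5.2
    simp only [List.getD_eq_getElem?_getD] at hc heq
    simp [hc, heq, hlt]
  | case6 si ti hcond h1 h2 h3 h4 h5 ih =>
    have hsi : pvSkip ss l si < l := by omega
    have hti : pvSkip ts l ti < l := by omega
    have hstop : (ts.take l).getD (pvSkip ts l ti) ' ' ≠ '_' := by
      rw [← pvSkip_take ts l ti]
      exact pvSkip_stop (ts.take l) l ti (by rw [pvSkip_take ts l ti]; omega)
    rw [← pf_skip ss l hs si, ← pf_skip (ts.take l) l htl.symm ti, pvSkip_take ts l ti,
        pf_step ss _ (by omega), pf_step (ts.take l) _ (by omega),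
        if_neg (pvSkip_stop ss l si hsi), if_neg hstop,
        getD_take_lt ts l _ hti, chk_cons, ih]
    have heq : ts.getD (pvSkip ts l ti) ' ' = ss.getD (pvSkip ss l si) ' ' := by
      by_contra hne; exact h3 hne
    by_cases hR' : ss.getD (pvSkip ss l si) ' ' = 'R' <;>
      by_cases hL' : ss.getD (pvSkip ss l si) ' ' = 'L' <;>
      simp_all
  | case7 si ti hcond =>
    rw [pf_stop ss si (by omega), pf_stop (ts.take l) ti (by omega)]
    simp [chk]

-- ---------- B side: counting ----------

-- count of elements below a threshold
def cb (n : Nat) (xs : List Nat) : Nat := xs.countP (fun x => decide (x < n))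

-- positions of the pieces with character c
def pos (c : Char) (ps : List (Char × Nat)) : List Nat :=
  (ps.filter (fun p => p.1 == c)).map Prod.snd

theorem map_fst_pfL (cs : List Char) : ∀ i,
    (pfL cs i).map Prod.fst = cs.filter (fun c => c != '_') := by
  induction cs with
  | nil => intro i; simp [pfL]
  | cons c r ih =>
    intro i
    by_cases hc : c = '_' <;> simp [pfL, hc, ih]

theorem pfL_ge (cs : List Char) : ∀ i, ∀ p ∈ pfL cs i, i ≤ p.2 := by
  induction cs with
  | nil => intro i p hp; simp [pfL] at hp
  | cons c r ih =>
    intro i p hp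
    by_cases hc : c = '_'
    · simp [pfL, hc] at hp
      have := ih (i+1) p hp; omega
    · simp [pfL, hc] at hp
      rcases hp with hp | hp
      · simp [hp]
      · have := ih (i+1) p hp; omega

theorem pfL_pairwise (cs : List Char) : ∀ i,
    (pfL cs i).Pairwise (fun p q => p.2 < q.2) := by
  induction cs with
  | nil => intro i; simp [pfL]
  | cons c r ih =>
    intro i
    by_cases hc : c = '_'
    · simp [pfL, hc]; exact ih (i+1)
    · rw [show pfL (c :: r) i = (c, i) :: pfL r (i+1) from by simp [pfL, hc]]
      refine List.pairwise_cons.mpr ⟨fun p hp => ?_, ih (i+1)⟩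
      have := pfL_ge r (i+1) p hp
      simp only []
      omega

theorem cb_zero (n : Nat) (xs : List Nat) (h : ∀ x ∈ xs, n ≤ x) : cb n xs = 0 := by
  unfold cb
  rw [List.countP_eq_zero]
  intro x hx
  simpa using Nat.not_lt.2 (h x hx)

-- prefix counts of a string = counts-below of piece positions
theorem cb_pos_pfL (c : Char) (hc : c ≠ '_') (cs : List Char) : ∀ k i,
    cb (k + i) (pos c (pfL cs k)) = (cs.take i).count c := by
  induction cs with
  | nil => intro k i; simp [pfL, pos, cb]
  | cons x r ih =>
    intro k i
    cases i with
    | zero =>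
      rw [Nat.add_zero]
      refine Eq.trans (cb_zero k _ ?_) (by simp)
      intro y hy
      simp only [pos, List.mem_map] at hy
      obtain ⟨p, hp, hpy⟩ := hy
      have := pfL_ge (x :: r) k p (List.mem_of_mem_filter hp)
      omega
    | succ i' =>
      by_cases hx : x = '_'
      · rw [show pfL (x :: r) k = pfL r (k+1) from by simp [pfL, hx],
            show k + (i'+1) = (k+1) + i' by omega, ih (k+1) i']
        simp [List.count_cons, hx, Ne.symm hc]
      · rw [show pfL (x :: r) k = (x, k) :: pfL r (k+1) from by simp [pfL, hx]]
        by_cases hxc : x = c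
        · rw [show pos c ((x, k) :: pfL r (k+1)) = k :: pos c (pfL r (k+1)) from by
                simp [pos, hxc],
              show cb (k + (i'+1)) (k :: pos c (pfL r (k+1)))
                  = cb (k + (i'+1)) (pos c (pfL r (k+1))) + 1 from by
                simp [cb, List.countP_cons],
              show k + (i'+1) = (k+1) + i' by omega, ih (k+1) i']
          simp [List.count_cons, hxc]
        · rw [show pos c ((x, k) :: pfL r (k+1)) = pos c (pfL r (k+1)) from by
                simp [pos, hxc],
              show k + (i'+1) = (k+1) + i' by omega, ih (k+1) i']
          simp [List.count_cons, hxc]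

-- sorted-lists lemma: pointwise ≤ on matched positions ⇔ counts-below dominance
theorem cb_iff_pointwise : ∀ (as bs : List Nat), as.Pairwise (· < ·) → bs.Pairwise (· < ·) →
    as.length = bs.length →
    ((∀ i, cb i as ≤ cb i bs) ↔ ∀ z ∈ bs.zip as, z.1 ≤ z.2) := by
  intro as
  induction as with
  | nil =>
    intro bs _ _ hlen
    have : bs = [] := List.eq_nil_of_length_eq_zero hlen.symm
    subst this; simp
  | cons a as' ih =>
    intro bs hpa hpb hlen
    cases bs with
    | nil => simp at hlen
    | cons b bs' =>
      have hpa' := (List.pairwise_cons.mp hpa).2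
      have hpb' := (List.pairwise_cons.mp hpb).2
      have haas : ∀ x ∈ as', a < x := (List.pairwise_cons.mp hpa).1
      have hbbs : ∀ x ∈ bs', b < x := (List.pairwise_cons.mp hpb).1
      have hlen' : as'.length = bs'.length := by simpa using hlen
      constructor
      · intro h
        have hba : b ≤ a := by
          have h1 : 1 ≤ cb (a+1) (a :: as') := by
            simp [cb, List.countP_cons]
          have h2 : 1 ≤ cb (a+1) (b :: bs') := le_trans h1 (h (a+1))
          by_contra hab
          push_neg at hab
          have : cb (a+1) (b :: bs') = 0 := by
            apply cb_zero
            intro x hx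
            rcases List.mem_cons.mp hx with hx | hx
            · omega
            · have := hbbs x hx; omega
          omega
        have htails : ∀ i, cb i as' ≤ cb i bs' := by
          intro i
          by_cases hia : i ≤ a
          · have : cb i as' = 0 := by
              apply cb_zero; intro x hx; have := haas x hx; omega
            omega
          · push_neg at hia
            have h1 : cb i (a :: as') = cb i as' + 1 := by
              simp [cb, List.countP_cons, hia]
            have h2 : cb i (b :: bs') = cb i bs' + 1 := by
              simp [cb, List.countP_cons]; omega
            have := h i
            omega
        intro z hz
        rw [List.zip_cons_cons] at hz
        rcases List.mem_cons.mp hz with hz' | hz'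
        · subst hz'; exact hba
        · exact (ih bs' hpa' hpb' hlen').mp htails z hz'
      · intro h i
        have hba : b ≤ a := by
          have : (b, a) ∈ (b :: bs').zip (a :: as') := by simp
          exact h _ this
        have htails := (ih bs' hpa' hpb' hlen').mpr (by
          intro z hz
          exact h z (by simp [List.zip_cons_cons]; right; exact hz))
        have h1 : cb i (a :: as') = cb i as' + (if a < i then 1 else 0) := by
          simp [cb, List.countP_cons]
        have h2 : cb i (b :: bs') = cb i bs' + (if b < i then 1 else 0) := by
          simp [cb, List.countP_cons]
        have := htails i
        split_ifs at h1 h2 <;> omega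

-- prefix count over a zipped list
def pc (c : Char) (f : Char × Char → Char) (zs : List (Char × Char)) (i : Nat) : Nat :=
  ((zs.take i).map f).count c

theorem pc_zero (c : Char) (f : Char × Char → Char) (zs : List (Char × Char)) :
    pc c f zs 0 = 0 := by simp [pc]

theorem pc_cons (c : Char) (f : Char × Char → Char) (z : Char × Char)
    (zs : List (Char × Char)) (i : Nat) :
    pc c f (z :: zs) (i+1) = pc c f zs i + (if f z == c then 1 else 0) := by
  simp [pc, List.count_cons]

-- B's loop checks exactly the prefix-count conditions
theorem cntLoop_iff : ∀ (zs : List (Char × Char)) (sl sr tl tr : Nat),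
    pvCntLoop zs sl sr tl tr = true ↔
      ∀ i < zs.length,
        (sl + pc 'L' Prod.fst zs (i+1) ≤ tl + pc 'L' Prod.snd zs (i+1)) ∧
        (tr + pc 'R' Prod.snd zs (i+1) ≤ sr + pc 'R' Prod.fst zs (i+1)) := by
  intro zs
  induction zs with
  | nil => intro sl sr tl tr; simp [pvCntLoop]
  | cons z rest ih =>
    intro sl sr tl tr
    obtain ⟨sc, tc⟩ := z
    simp only [pvCntLoop]
    have hp1 : (if sc = 'L' then (sl+1, sr) else if sc = 'R' then (sl, sr+1) else (sl, sr)).1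
        = sl + (if sc == 'L' then 1 else 0) := by
      by_cases h1 : sc = 'L'
      · simp [h1]
      · by_cases h2 : sc = 'R' <;> simp [h1, h2]
    have hp2 : (if sc = 'L' then (sl+1, sr) else if sc = 'R' then (sl, sr+1) else (sl, sr)).2
        = sr + (if sc == 'R' then 1 else 0) := by
      by_cases h1 : sc = 'L'
      · simp [h1]
      · by_cases h2 : sc = 'R' <;> simp [h1, h2]
    have hq1 : (if tc = 'L' then (tl+1, tr) else if tc = 'R' then (tl, tr+1) else (tl, tr)).1
        = tl + (if tc == 'L' then 1 else 0) := by
      by_cases h1 : tc = 'L'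
      · simp [h1]
      · by_cases h2 : tc = 'R' <;> simp [h1, h2]
    have hq2 : (if tc = 'L' then (tl+1, tr) else if tc = 'R' then (tl, tr+1) else (tl, tr)).2
        = tr + (if tc == 'R' then 1 else 0) := by
      by_cases h1 : tc = 'L'
      · simp [h1]
      · by_cases h2 : tc = 'R' <;> simp [h1, h2]
    rw [hp1, hp2, hq1, hq2]
    simp only [pc_cons, List.length_cons]
    by_cases hcond : tl + (if tc == 'L' then 1 else 0) < sl + (if sc == 'L' then 1 else 0)
        ∨ sr + (if sc == 'R' then 1 else 0) < tr + (if tc == 'R' then 1 else 0)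
    · rw [if_pos hcond]
      simp only [Bool.false_eq_true, false_iff]
      intro hall
      have h0 := hall 0 (by omega)
      rw [pc_zero, pc_zero, pc_zero, pc_zero] at h0
      omega
    · rw [if_neg hcond, ih]
      constructor
      · intro h i hi
        cases i with
        | zero =>
          rw [pc_zero, pc_zero, pc_zero, pc_zero]
          omega
        | succ j =>
          have := h j (by omega)
          omega
      · intro h j hj
        have := h (j+1) (by omega)
        omega

-- chk forces equal character sequences
theorem chk_fst : ∀ (xs ys : List (Char × Nat)),
    chk xs ys = true → xs.map Prod.fst = ys.map Prod.fst := by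
  intro xs
  induction xs with
  | nil =>
    intro ys h
    cases ys with
    | nil => rfl
    | cons y ys' => simp [chk] at h
  | cons x xs' ih =>
    intro ys h
    cases ys with
    | nil => simp [chk] at h
    | cons y ys' =>
      rw [chk_cons] at h
      simp only [Bool.and_eq_true, beq_iff_eq] at h
      obtain ⟨⟨⟨hxy, _⟩, _⟩, hrest⟩ := h
      simp [hxy, ih ys' hrest]

-- fst components agree along the zip when the fst maps agree
theorem zip_fst_eq : ∀ (xs ys : List (Char × Nat)),
    xs.map Prod.fst = ys.map Prod.fst → ∀ z ∈ xs.zip ys, z.1.1 = z.2.1 := by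
  intro xs
  induction xs with
  | nil => intro ys _ z hz; simp at hz
  | cons x xs' ih =>
    intro ys hf z hz
    cases ys with
    | nil => simp at hz
    | cons y ys' =>
      simp only [List.map_cons, List.cons.injEq] at hf
      rw [List.zip_cons_cons] at hz
      rcases List.mem_cons.mp hz with hz' | hz'
      · subst hz'; exact hf.1
      · exact ih ys' hf.2 z hz'

-- filtering commutes with zipping when the fst maps agree
theorem zip_filter (c : Char) : ∀ (xs ys : List (Char × Nat)),
    xs.map Prod.fst = ys.map Prod.fst →
    (xs.filter (fun p => p.1 == c)).zip (ys.filter (fun p => p.1 == c)) =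
      (xs.zip ys).filter (fun z => z.1.1 == c) := by
  intro xs
  induction xs with
  | nil =>
    intro ys hf
    have : ys = [] := by
      cases ys with
      | nil => rfl
      | cons y ys' => simp at hf
    subst this; rfl
  | cons x xs' ih =>
    intro ys hf
    cases ys with
    | nil => simp at hf
    | cons y ys' =>
      simp only [List.map_cons, List.cons.injEq] at hf
      rw [List.zip_cons_cons, List.filter_cons, List.filter_cons, List.filter_cons]
      by_cases hc : x.1 = c
      · have hyc : (y.1 == c) = true := by rw [← hf.1]; simpa using hc
        simp only [hc, hyc, if_pos, beq_self_eq_true]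
        rw [List.zip_cons_cons, ih ys' hf.2]
      · have hyc : (y.1 == c) = false := by
          rw [← hf.1]; simpa using hc
        have hxc : (x.1 == c) = false := by simpa using hc
        simp only [hxc, hyc, Bool.false_eq_true, if_neg, if_false]
        exact ih ys' hf.2

-- my own take-of-zip lemma
theorem take_zip' {α β : Type} : ∀ (as : List α) (bs : List β) (n : Nat),
    (as.zip bs).take n = (as.take n).zip (bs.take n) := by
  intro as
  induction as with
  | nil => intro bs n; simp
  | cons a as' ih =>
    intro bs n
    cases bs with
    | nil => simp
    | cons b bs' =>
      cases n with
      | zero => simp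
      | succ m => simp [List.zip_cons_cons, ih]

-- pc over a zip of equal-length strings = prefix count of the corresponding string
theorem pc_fst (ss ts : List Char) (h : ss.length ≤ ts.length) (c : Char) (i : Nat) :
    pc c Prod.fst (ss.zip ts) i = ((ss.take i).count c) := by
  unfold pc
  rw [take_zip', List.map_fst_zip (by simp; omega)]

theorem pc_snd (ss ts : List Char) (h : ts.length ≤ ss.length) (c : Char) (i : Nat) :
    pc c Prod.snd (ss.zip ts) i = ((ts.take i).count c) := by
  unfold pc
  rw [take_zip', List.map_snd_zip (by simp; omega)]

-- swap the zip order inside a ∀-over-membership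
theorem zip_swap_forall (as bs : List Nat) (rel : Nat → Nat → Prop) :
    (∀ z ∈ as.zip bs, rel z.1 z.2) ↔ (∀ z ∈ bs.zip as, rel z.2 z.1) := by
  constructor
  · intro h z hz
    rw [← List.zip_swap] at hz
    obtain ⟨w, hw, hwz⟩ := List.mem_map.mp hz
    subst hwz
    exact h w hw
  · intro h z hz
    have : z.swap ∈ bs.zip as := by
      rw [← List.zip_swap]
      exact List.mem_map_of_mem hz
    exact h z.swap this

-- pointwise piece condition for character c, expressed on position lists
theorem pos_zip_iff (c : Char) (rel : Nat → Nat → Prop)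
    (xs ys : List (Char × Nat)) (hf : xs.map Prod.fst = ys.map Prod.fst) :
    (∀ z ∈ xs.zip ys, z.1.1 = c → rel z.1.2 z.2.2) ↔
      (∀ w ∈ (pos c xs).zip (pos c ys), rel w.1 w.2) := by
  unfold pos
  rw [List.zip_map, zip_filter c xs ys hf]
  constructor
  · intro h w hw
    obtain ⟨z, hz, hzw⟩ := List.mem_map.mp hw
    subst hzw
    exact h z (List.mem_of_mem_filter hz) (by simpa using (List.of_mem_filter hz))
  · intro h z hz hzc
    have hmem : z ∈ (xs.zip ys).filter (fun z => z.1.1 == c) :=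
      List.mem_filter.mpr ⟨hz, by simpa using hzc⟩
    exact h (z.1.2, z.2.2) (List.mem_map_of_mem hmem)

-- pairwise-< of the position lists
theorem pos_pairwise (c : Char) (cs : List Char) :
    (pos c (pfL cs 0)).Pairwise (· < ·) := by
  unfold pos
  rw [List.pairwise_map]
  exact (pfL_pairwise cs 0).sublist List.filter_sublist

theorem pos_length (c : Char) (xs ys : List (Char × Nat))
    (hf : xs.map Prod.fst = ys.map Prod.fst) :
    (pos c xs).length = (pos c ys).length := by
  unfold pos
  rw [List.length_map, List.length_map, ← List.countP_eq_length_filter,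
      ← List.countP_eq_length_filter]
  have : List.countP ((fun x => x == c) ∘ Prod.fst) xs
      = List.countP ((fun x => x == c) ∘ Prod.fst) ys := by
    rw [← List.countP_map, ← List.countP_map, hf]
  simpa using this

-- main counting equivalence
theorem chk_eq_cnt (ss ts : List Char) (hlen : ts.length = ss.length)
    (hf : ss.filter (fun c => c != '_') = ts.filter (fun c => c != '_')) :
    chk (pfL ss 0) (pfL ts 0) = pvCntLoop (ss.zip ts) 0 0 0 0 := by
  have hfst : (pfL ss 0).map Prod.fst = (pfL ts 0).map Prod.fst := by
    rw [map_fst_pfL, map_fst_pfL, hf]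
  have hlens : (pfL ss 0).length = (pfL ts 0).length := by
    rw [← List.length_map (f := Prod.fst), hfst, List.length_map]
  have hzf := zip_fst_eq _ _ hfst
  -- position-count bridges (k = 0 instance of cb_pos_pfL)
  have hcbS : ∀ (c : Char), c ≠ '_' → ∀ i, cb i (pos c (pfL ss 0)) = (ss.take i).count c := by
    intro c hc i; simpa using cb_pos_pfL c hc ss 0 i
  have hcbT : ∀ (c : Char), c ≠ '_' → ∀ i, cb i (pos c (pfL ts 0)) = (ts.take i).count c := by
    intro c hc i; simpa using cb_pos_pfL c hc ts 0 i
  rw [Bool.eq_iff_iff]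
  unfold chk
  rw [if_neg (by simpa using hlens), List.all_eq_true, cntLoop_iff]
  -- step 1: the boolean pair predicate ⇔ two implications per pair
  have step1 : (∀ z ∈ (pfL ss 0).zip (pfL ts 0),
        (z.1.1 == z.2.1 && !(z.1.1 == 'R' && decide (z.2.2 < z.1.2))
                        && !(z.1.1 == 'L' && decide (z.1.2 < z.2.2))) = true) ↔
      ((∀ z ∈ (pfL ss 0).zip (pfL ts 0), z.1.1 = 'R' → z.1.2 ≤ z.2.2) ∧
       (∀ z ∈ (pfL ss 0).zip (pfL ts 0), z.1.1 = 'L' → z.2.2 ≤ z.1.2)) := by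
    rw [← forall₂_and]
    apply forall₂_congr
    intro z hz
    have hzc := hzf z hz
    simp only [Bool.and_eq_true, Bool.not_eq_eq_eq_not, Bool.not_true, Bool.and_eq_false_imp,
      beq_iff_eq, decide_eq_false_iff_not, Nat.not_lt]
    constructor
    · rintro ⟨⟨_, hR⟩, hL⟩
      exact ⟨hR, hL⟩
    · rintro ⟨hR, hL⟩
      exact ⟨⟨hzc, hR⟩, hL⟩
  rw [step1]
  have hR : (∀ z ∈ (pfL ss 0).zip (pfL ts 0), z.1.1 = 'R' → z.1.2 ≤ z.2.2) ↔
      (∀ i, cb i (pos 'R' (pfL ts 0)) ≤ cb i (pos 'R' (pfL ss 0))) :=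
    (pos_zip_iff 'R' (· ≤ ·) _ _ hfst).trans
      (cb_iff_pointwise (pos 'R' (pfL ts 0)) (pos 'R' (pfL ss 0))
        (pos_pairwise 'R' ts) (pos_pairwise 'R' ss) (pos_length 'R' _ _ hfst.symm)).symm
  have hL : (∀ z ∈ (pfL ss 0).zip (pfL ts 0), z.1.1 = 'L' → z.2.2 ≤ z.1.2) ↔
      (∀ i, cb i (pos 'L' (pfL ss 0)) ≤ cb i (pos 'L' (pfL ts 0))) :=
    (pos_zip_iff 'L' (fun a b => b ≤ a) _ _ hfst).trans
      ((zip_swap_forall (pos 'L' (pfL ss 0)) (pos 'L' (pfL ts 0)) (fun a b => b ≤ a)).trans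
        (cb_iff_pointwise (pos 'L' (pfL ss 0)) (pos 'L' (pfL ts 0))
          (pos_pairwise 'L' ss) (pos_pairwise 'L' ts) (pos_length 'L' _ _ hfst)).symm)
  rw [hR, hL]
  -- step 3: counts-below = prefix counts of the strings
  constructor
  · rintro ⟨hRc, hLc⟩ i hi
    have h1 := hLc (i+1)
    have h2 := hRc (i+1)
    rw [hcbS 'L' (by decide), hcbT 'L' (by decide)] at h1
    rw [hcbS 'R' (by decide), hcbT 'R' (by decide)] at h2
    rw [pc_fst ss ts (by omega), pc_snd ss ts (by omega),
        pc_fst ss ts (by omega), pc_snd ss ts (by omega)]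
    omega
  · intro h
    have hn : (ss.zip ts).length = ss.length := by simp; omega
    have hall : ∀ i, (ss.take i).count 'L' ≤ (ts.take i).count 'L' ∧
        (ts.take i).count 'R' ≤ (ss.take i).count 'R' := by
      intro i
      rcases Nat.eq_zero_or_pos i with hi0 | hipos
      · subst hi0; simp
      · by_cases hle : i ≤ ss.length
        · have := h (i-1) (by omega)
          rw [pc_fst ss ts (by omega), pc_snd ss ts (by omega),
              pc_fst ss ts (by omega), pc_snd ss ts (by omega)] at this
          have hi1 : i - 1 + 1 = i := by omega
          rw [hi1] at this
          omega
        · push_neg at hle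
          rw [List.take_of_length_le (by omega), List.take_of_length_le (by omega)]
          rcases Nat.eq_zero_or_pos ss.length with hz | hpos
          · have hts : ts = [] := List.eq_nil_of_length_eq_zero (by omega)
            have hss : ss = [] := List.eq_nil_of_length_eq_zero (by omega)
            subst hts; subst hss; simp
          · have := h (ss.length - 1) (by omega)
            rw [pc_fst ss ts (by omega), pc_snd ss ts (by omega),
                pc_fst ss ts (by omega), pc_snd ss ts (by omega)] at this
            have hi1 : ss.length - 1 + 1 = ss.length := by omega
            rw [hi1, List.take_of_length_le (le_refl ss.length),
                List.take_of_length_le (le_of_eq hlen)] at this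
            exact ⟨by omega, by omega⟩
    constructor
    · intro i
      rw [hcbS 'R' (by decide), hcbT 'R' (by decide)]
      exact (hall i).2
    · intro i
      rw [hcbS 'L' (by decide), hcbT 'L' (by decide)]
      exact (hall i).1

theorem alt_eq_chk (start target : String)
    (hpre : start.toList.length ≤ target.toList.length) :
    canChange_alt start target =
      chk (pf start.toList 0) (pf (target.toList.take start.toList.length) 0) := by
  have hpf : ∀ cs : List Char, pf cs 0 = pfL cs 0 := by intro cs; simp [pf]
  simp only [canChange_alt]
  rw [PySem.List.slice_to_natCast]
  have hlen : (target.toList.take start.toList.length).length = start.toList.length := by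
    rw [List.length_take]; omega
  by_cases hfil : start.toList.filter (fun c => c != '_')
      = (target.toList.take start.toList.length).filter (fun c => c != '_')
  · rw [if_neg (by simpa using hfil), hpf, hpf, chk_eq_cnt _ _ hlen hfil]
  · rw [if_pos (by simpa using hfil), hpf, hpf]
    cases hchk : chk (pfL start.toList 0) (pfL (target.toList.take start.toList.length) 0) with
    | false => rfl
    | true =>
      exact absurd (by
        rw [← map_fst_pfL start.toList 0, ← map_fst_pfL (target.toList.take start.toList.length) 0]
        exact chk_fst _ _ hchk) hfil

-- ===== VERDICT (by name: the statement is the Claim_ definition above) =====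
theorem canChange_spec : Claim_equal_canChange := by
  intro start target _hdom hpre
  unfold Spec_canChange
  rw [canChange, alt_eq_chk start target hpre,
      loop_eq_chk start.toList target.toList start.toList.length rfl hpre 0 0]
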